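-- pv_equiv track=rewrite | github.com/eamongoonan/CA117 | Lab1.2/password_012.py | char_classes
-- ===== SOURCE A (Python) =====
-- def char_classes(string):
--     classes = [0, 0, 0, 0]
--     for char in string:
--         classes[0] = 1 if (char.isdigit()) else classes[0]
--         classes[1] = 1 if (char.isalpha() and char.islower()) else classes[1]
--         classes[2] = 1 if (char.isalpha() and char.isupper()) else classes[2]
--         classes[3] = 1 if not(char.isalpha() or char.isdigit()) else classes[3]
--         if (sum(classes) == 4):
--             break
--     return sum(classes)
-- ===== SOURCE B (Python) =====
-- def char_classes(string):
--     return (any(c.isdigit() for c in string)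
--             + any(c.isalpha() and c.islower() for c in string)
--             + any(c.isalpha() and c.isupper() for c in string)
--             + any(not (c.isalpha() or c.isdigit()) for c in string))
-- ===== Notes on version B (the rewrite author's own statement) =====
-- stated objective: simpler
-- what changed: Replaces the single flag-maintaining loop (with early break) by four independent any() existence checks summed as 0/1 booleans.
import Mathlib
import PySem

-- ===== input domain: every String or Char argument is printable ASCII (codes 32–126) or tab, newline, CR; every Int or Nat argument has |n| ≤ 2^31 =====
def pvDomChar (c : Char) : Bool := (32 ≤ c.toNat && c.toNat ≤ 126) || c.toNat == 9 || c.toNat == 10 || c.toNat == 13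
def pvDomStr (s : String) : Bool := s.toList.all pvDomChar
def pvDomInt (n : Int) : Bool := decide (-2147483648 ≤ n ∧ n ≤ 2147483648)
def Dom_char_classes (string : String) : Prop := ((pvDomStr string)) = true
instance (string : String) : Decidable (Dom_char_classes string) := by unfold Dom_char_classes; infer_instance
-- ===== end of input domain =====

-- B replaces A's single flag-maintaining loop (with early exit) by four independent summed existence checks: simpler decomposition.


-- ===== PORT A =====
-- the for-loop over the string with the four flags and the early break at sum == 4
def charClassesLoop : List Char → Int → Int → Int → Int → Int
  | [], c0, c1, c2, c3 => c0 + c1 + c2 + c3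
  | ch :: rest, c0, c1, c2, c3 =>
    let c0' : Int := if PySem.Chars.isdigit ch then 1 else c0
    let c1' : Int := if PySem.Chars.isalpha ch && PySem.Chars.islower ch then 1 else c1
    let c2' : Int := if PySem.Chars.isalpha ch && PySem.Chars.isupper ch then 1 else c2
    let c3' : Int := if !(PySem.Chars.isalpha ch || PySem.Chars.isdigit ch) then 1 else c3
    if c0' + c1' + c2' + c3' = 4 then c0' + c1' + c2' + c3'
    else charClassesLoop rest c0' c1' c2' c3'

def char_classes (string : String) : Int :=
  charClassesLoop string.toList 0 0 0 0

-- ===== PORT B =====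
-- bool summed as 0/1, as Python's any(...) + any(...) does
def pyBoolInt (b : Bool) : Int := if b then 1 else 0

def char_classes_alt (string : String) : Int :=
  pyBoolInt (string.toList.any fun c => PySem.Chars.isdigit c)
  + pyBoolInt (string.toList.any fun c => PySem.Chars.isalpha c && PySem.Chars.islower c)
  + pyBoolInt (string.toList.any fun c => PySem.Chars.isalpha c && PySem.Chars.isupper c)
  + pyBoolInt (string.toList.any fun c => !(PySem.Chars.isalpha c || PySem.Chars.isdigit c))

-- ===== PRECONDITION & SPEC =====
def Spec_char_classes (string : String) (out : Int) : Prop := out = char_classes_alt string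
instance (string : String) (out : Int) : Decidable (Spec_char_classes string out) := by unfold Spec_char_classes; infer_instance

-- ===== CLAIM (what is proved, stated in full; the proofs are below) =====
def Claim_equal_char_classes : Prop := ∀ (string : String), Dom_char_classes string → Spec_char_classes string (char_classes string)

-- ===== LEMMAS AND PROOFS =====
theorem if_eq_pyBoolInt (p b : Bool) :
    (if p then (1 : Int) else pyBoolInt b) = pyBoolInt (p || b) := by
  cases p <;> cases b <;> rfl

theorem charClassesLoop_eq (l : List Char) (b0 b1 b2 b3 : Bool) :
    charClassesLoop l (pyBoolInt b0) (pyBoolInt b1) (pyBoolInt b2) (pyBoolInt b3)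
      = pyBoolInt (b0 || l.any fun c => PySem.Chars.isdigit c)
        + pyBoolInt (b1 || l.any fun c => PySem.Chars.isalpha c && PySem.Chars.islower c)
        + pyBoolInt (b2 || l.any fun c => PySem.Chars.isalpha c && PySem.Chars.isupper c)
        + pyBoolInt (b3 || l.any fun c => !(PySem.Chars.isalpha c || PySem.Chars.isdigit c)) := by
  induction l generalizing b0 b1 b2 b3 with
  | nil => simp [charClassesLoop]
  | cons ch rest ih =>
    simp only [charClassesLoop, if_eq_pyBoolInt, List.any_cons]
    have hor : ∀ (b p q : Bool), (b || (p || q)) = ((p || b) || q) := by decide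
    rw [hor b0, hor b1, hor b2, hor b3]
    split_ifs with h
    · revert h
      cases (PySem.Chars.isdigit ch || b0)
        <;> cases (PySem.Chars.isalpha ch && PySem.Chars.islower ch || b1)
        <;> cases (PySem.Chars.isalpha ch && PySem.Chars.isupper ch || b2)
        <;> cases (!(PySem.Chars.isalpha ch || PySem.Chars.isdigit ch) || b3)
        <;> simp [pyBoolInt]
    · exact ih _ _ _ _

-- ===== VERDICT (by name: the statement is the Claim_ definition above) =====
theorem char_classes_spec : Claim_equal_char_classes := by
  intro s _
  show char_classes s = char_classes_alt s
  have := charClassesLoop_eq s.toList false false false false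
  simpa [char_classes, char_classes_alt, pyBoolInt] using this
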